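-- pv_equiv track=rewrite | github.com/epilectrik/voynich | archive/scripts/suffix_location_probe.py | decompose_token
-- ===== SOURCE A (Python) =====
-- PREFIXES = ['ch', 'qo', 'sh', 'da', 'ok', 'ot', 'ct', 'ol']
--
-- def get_prefix(token):
--     """Extract prefix from token."""
--     for p in sorted(PREFIXES, key=len, reverse=True):
--         if token.startswith(p):
--             return p
--     return None
--
-- def decompose_token(token):
--     """Decompose token into prefix, middle, suffix."""
--     prefix = get_prefix(token)
--     if not prefix:
--         return None, None, None
--
--     remainder = token[len(prefix):]
--
--     # Common suffixes (from prior analysis)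
--     SUFFIXES = ['aiin', 'ain', 'edy', 'eedy', 'dy', 'ey', 'eey', 'ol', 'eol',
--                 'or', 'ar', 'al', 'y', 'o', 'am', 'chy', 'cthy', 'ckhy']
--
--     suffix = None
--     middle = remainder
--
--     for s in sorted(SUFFIXES, key=len, reverse=True):
--         if remainder.endswith(s):
--             suffix = s
--             middle = remainder[:-len(s)]
--             break
--
--     if suffix is None and len(remainder) > 0:
--         # Last 1-2 chars as suffix
--         if len(remainder) >= 2:
--             suffix = remainder[-2:]
--             middle = remainder[:-2]
--         else:
--             suffix = remainder
--             middle = ''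
--
--     return prefix, middle, suffix
-- ===== SOURCE B (Python) =====
-- PREFIX_SET = {'ch', 'qo', 'sh', 'da', 'ok', 'ot', 'ct', 'ol'}
-- SUFFIX_SET = {'aiin', 'ain', 'edy', 'eedy', 'dy', 'ey', 'eey', 'ol', 'eol',
--               'or', 'ar', 'al', 'y', 'o', 'am', 'chy', 'cthy', 'ckhy'}
--
-- def decompose_token(token):
--     """Decompose token into prefix, middle, suffix."""
--     prefix = token[:2]
--     if prefix not in PREFIX_SET:
--         return None, None, None
--     rem = token[2:]
--     for L in (4, 3, 2, 1):
--         if len(rem) >= L and rem[-L:] in SUFFIX_SET: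
--             return prefix, rem[:-L], rem[-L:]
--     if rem:
--         k = 2 if len(rem) >= 2 else 1
--         return prefix, rem[:-k], rem[-k:]
--     return prefix, '', None
-- ===== Notes on version B (the rewrite author's own statement) =====
-- stated objective: alternative
-- what changed: B replaces A's runtime length-sort and linear endswith-scan over the 18 suffixes (and the startswith loop over the prefixes) by prebuilt sets probed by slice length: it tests the token's first-2-character slice against a prefix set, then tries suffix lengths 4,3,2,1 longest-first with one set-membership test per length.
import Mathlib
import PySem

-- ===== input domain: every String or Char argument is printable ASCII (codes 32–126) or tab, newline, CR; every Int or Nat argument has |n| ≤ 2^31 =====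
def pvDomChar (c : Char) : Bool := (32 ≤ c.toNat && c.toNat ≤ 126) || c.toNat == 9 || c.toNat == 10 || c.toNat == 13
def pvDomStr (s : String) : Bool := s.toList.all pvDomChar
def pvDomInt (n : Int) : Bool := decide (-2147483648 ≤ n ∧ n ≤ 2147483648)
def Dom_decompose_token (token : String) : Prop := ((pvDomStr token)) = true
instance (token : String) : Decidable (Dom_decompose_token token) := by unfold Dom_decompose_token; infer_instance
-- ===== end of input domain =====

-- B replaces A's scans over length-sorted suffix/prefix lists by set membership probed per
-- slice length (longest first); same return value, different decomposition (objective: alternative).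

-- ===== PORT A =====
def pvPREFIXES : List String := ["ch", "qo", "sh", "da", "ok", "ot", "ct", "ol"]

def pvSUFFIXES : List String :=
  ["aiin", "ain", "edy", "eedy", "dy", "ey", "eey", "ol", "eol",
   "or", "ar", "al", "y", "o", "am", "chy", "cthy", "ckhy"]

def get_prefix (token : String) : Option String :=
  (PySem.List.sorted pvPREFIXES (fun s => PySem.Str.len s) true).find?
    (fun p => PySem.Str.startswith token p)

def decompose_token (token : String) : Option String × Option String × Option String :=
  match get_prefix token with
  | none => (none, none, none)
  | some pfx =>
    let remainder := PySem.Str.slice token (some (PySem.Str.len pfx : Int)) none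
    match (PySem.List.sorted pvSUFFIXES (fun s => PySem.Str.len s) true).find?
        (fun s => PySem.Str.endswith remainder s) with
    | some s =>
        (some pfx,
         some (PySem.Str.slice remainder none (some (-(PySem.Str.len s : Int)))),
         some s)
    | none =>
        if PySem.Str.len remainder > 0 then
          if PySem.Str.len remainder ≥ 2 then
            (some pfx, some (PySem.Str.slice remainder none (some (-2))),
             some (PySem.Str.slice remainder (some (-2)) none))
          else
            (some pfx, some "", some remainder)
        else
          (some pfx, some remainder, none)

-- ===== PORT B =====
def pvPREFIX_SET : PySem.Set String :=
  PySem.Set.ofList ["ch", "qo", "sh", "da", "ok", "ot", "ct", "ol"]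

def pvSUFFIX_SET : PySem.Set String :=
  PySem.Set.ofList ["aiin", "ain", "edy", "eedy", "dy", "ey", "eey", "ol", "eol",
                    "or", "ar", "al", "y", "o", "am", "chy", "cthy", "ckhy"]

-- the 'for L in (4, 3, 2, 1)' loop of Source B (returns (middle, suffix) on the first hit)
def altSuffixLoop (rem : String) : List Int → Option (String × String)
  | [] => none
  | L :: Ls =>
      if (L ≤ (PySem.Str.len rem : Int)) ∧
         PySem.Set.contains pvSUFFIX_SET (PySem.Str.slice rem (some (-L)) none) = true then
        some (PySem.Str.slice rem none (some (-L)), PySem.Str.slice rem (some (-L)) none)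
      else altSuffixLoop rem Ls

def decompose_token_alt (token : String) : Option String × Option String × Option String :=
  let pfx := PySem.Str.slice token none (some 2)
  if PySem.Set.contains pvPREFIX_SET pfx = true then
    let rem := PySem.Str.slice token (some 2) none
    match altSuffixLoop rem [4, 3, 2, 1] with
    | some (mid, suf) => (some pfx, some mid, some suf)
    | none =>
        if PySem.Str.len rem ≠ 0 then
          let k : Int := if 2 ≤ PySem.Str.len rem then 2 else 1
          (some pfx, some (PySem.Str.slice rem none (some (-k))),
           some (PySem.Str.slice rem (some (-k)) none))
        else
          (some pfx, some "", none)
  else (none, none, none)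

-- ===== PRECONDITION & SPEC =====
def Spec_decompose_token (token : String) (out : Option String × Option String × Option String) : Prop := out = decompose_token_alt token
instance (token : String) (out : Option String × Option String × Option String) : Decidable (Spec_decompose_token token out) := by unfold Spec_decompose_token; infer_instance

-- ===== CLAIM (what is proved, stated in full; the proofs are below) =====
def Claim_equal_decompose_token : Prop := ∀ (token : String), Dom_decompose_token token → Spec_decompose_token token (decompose_token token)

-- ===== LEMMAS AND PROOFS =====

-- the last-L characters of r (what Python's r[-L:] yields, clamped)
def lastStr (r : String) (L : Nat) : String := String.ofList (r.toList.drop (r.toList.length - L))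

-- the first-L characters of r (what Python's r[:L] yields, clamped)
def firstStr (r : String) (L : Nat) : String := String.ofList (r.toList.take L)

-- the length-L members of SUFFIXES, in A's stable length-sorted order
def groupOf : Nat → List String
  | 4 => ["aiin", "eedy", "cthy", "ckhy"]
  | 3 => ["ain", "edy", "eey", "eol", "chy"]
  | 2 => ["dy", "ey", "ol", "or", "ar", "al", "am"]
  | 1 => ["y", "o"]
  | _ => []

lemma endswith_iff_lastStr (r s : String) :
    PySem.Str.endswith r s = true ↔ s = lastStr r s.toList.length := by
  rw [show PySem.Str.endswith r s = PySem.Chars.endswith r.toList s.toList from by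
        simp [PySem.Str.endswith_eq],
      PySem.Chars.endswith_iff, List.suffix_iff_eq_drop, lastStr]
  constructor
  · intro h; apply String.toList_inj.mp; simp; simpa using h
  · intro h; have := congrArg String.toList h; simp at this; simpa using this

lemma startswith_iff_firstStr (t p : String) :
    PySem.Str.startswith t p = true ↔ p = firstStr t p.toList.length := by
  rw [show PySem.Str.startswith t p = PySem.Chars.startswith t.toList p.toList from by
        simp [PySem.Str.startswith_eq],
      PySem.Chars.startswith_iff, List.prefix_iff_eq_take, firstStr]
  constructor
  · intro h; apply String.toList_inj.mp; simp; simpa using h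
  · intro h; have := congrArg String.toList h; simp at this; simpa using this

lemma find?_endswith_group (L : Nat) (r : String) :
    ∀ (g : List String), (∀ s ∈ g, s.toList.length = L) →
      g.find? (fun s => PySem.Str.endswith r s)
        = if lastStr r L ∈ g then some (lastStr r L) else none := by
  intro g
  induction g with
  | nil => simp
  | cons s gs ih =>
    intro hg
    have hs : s.toList.length = L := hg s (by simp)
    by_cases h : PySem.Str.endswith r s = true
    · have hsl : s = lastStr r L := by
        have := (endswith_iff_lastStr r s).mp h; rwa [hs] at this
      rw [List.find?_cons_of_pos h, ← hsl]
      simp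
    · have hne : lastStr r L ≠ s := by
        intro he
        exact h ((endswith_iff_lastStr r s).mpr (by rw [hs, he]))
      rw [List.find?_cons_of_neg (by simpa using h),
          ih (fun x hx => hg x (by simp [hx]))]
      simp [List.mem_cons, hne]

lemma find?_startswith_group (L : Nat) (t : String) :
    ∀ (g : List String), (∀ s ∈ g, s.toList.length = L) →
      g.find? (fun p => PySem.Str.startswith t p)
        = if firstStr t L ∈ g then some (firstStr t L) else none := by
  intro g
  induction g with
  | nil => simp
  | cons s gs ih =>
    intro hg
    have hs : s.toList.length = L := hg s (by simp)
    by_cases h : PySem.Str.startswith t s = true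
    · have hsl : s = firstStr t L := by
        have := (startswith_iff_firstStr t s).mp h; rwa [hs] at this
      rw [List.find?_cons_of_pos h, ← hsl]
      simp
    · have hne : firstStr t L ≠ s := by
        intro he
        exact h ((startswith_iff_firstStr t s).mpr (by rw [hs, he]))
      rw [List.find?_cons_of_neg (by simpa using h),
          ih (fun x hx => hg x (by simp [hx]))]
      simp [List.mem_cons, hne]

lemma length_lastStr (r : String) (L : Nat) :
    (lastStr r L).toList.length = min L r.toList.length := by
  simp [lastStr]; omega

-- suffix-set membership of a length-L string picks out exactly that length's group
lemma memS_iff (x : String) (L : Nat) (hx : x.toList.length = L)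
    (hL : L = 4 ∨ L = 3 ∨ L = 2 ∨ L = 1) :
    (x ∈ pvSUFFIX_SET) ↔ x ∈ groupOf L := by
  have hmem : x ∈ pvSUFFIX_SET ↔ x ∈ (["aiin", "ain", "edy", "eedy", "dy", "ey", "eey", "ol", "eol",
      "or", "ar", "al", "y", "o", "am", "chy", "cthy", "ckhy"] : List String) := by
    rw [show pvSUFFIX_SET = PySem.Set.ofList _ from rfl, PySem.Set.mem_ofList]
  rw [hmem]
  rcases hL with rfl | rfl | rfl | rfl <;> rw [groupOf] <;>
    (constructor <;> intro h <;>
      simp only [List.mem_cons, List.not_mem_nil, or_false] at h ⊢ <;>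
      rcases h with rfl|rfl|rfl|rfl|rfl|rfl|rfl|rfl|rfl|rfl|rfl|rfl|rfl|rfl|rfl|rfl|rfl|rfl <;>
      simp_all)

lemma length_of_mem_groupOf (x : String) (L : Nat) (hL : L = 4 ∨ L = 3 ∨ L = 2 ∨ L = 1)
    (h : x ∈ groupOf L) : x.toList.length = L := by
  rcases hL with rfl | rfl | rfl | rfl <;> rw [groupOf] at h <;>
    simp only [List.mem_cons, List.not_mem_nil, or_false] at h <;>
    rcases h with rfl|rfl|rfl|rfl|rfl|rfl|rfl <;> rfl

lemma suffix_slice_eq (rem : String) (L : Nat) (hpos : 0 < L) :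
    PySem.Str.slice rem (some (-(L : Int))) none = lastStr rem L := by
  apply String.toList_inj.mp
  rw [lastStr]
  simp
  rw [PySem.List.slice_from_neg_natCast]
  · simp
  · omega

lemma middle_slice_eq (rem : String) (L : Nat) (hpos : 0 < L) :
    PySem.Str.slice rem none (some (-(L : Int)))
      = String.ofList (rem.toList.take (rem.toList.length - L)) := by
  apply String.toList_inj.mp
  simp
  rw [PySem.List.slice_to_neg_natCast]
  · simp
  · omega

-- B's loop condition at length L equals "the last L chars form a length-L suffix"
lemma altCond_iff (rem : String) (L : Nat) (hL : L = 4 ∨ L = 3 ∨ L = 2 ∨ L = 1) :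
    (((L : Int) ≤ (PySem.Str.len rem : Int)) ∧
       PySem.Set.contains pvSUFFIX_SET (PySem.Str.slice rem (some (-(L : Int))) none) = true) ↔
      lastStr rem L ∈ groupOf L := by
  have hpos : 0 < L := by rcases hL with rfl | rfl | rfl | rfl <;> omega
  have hlenr : PySem.Str.len rem = rem.toList.length := by simp [pysem]
  rw [suffix_slice_eq rem L hpos, PySem.Set.contains_iff]
  constructor
  · rintro ⟨h1, h2⟩
    have hle : L ≤ rem.toList.length := by
      rw [hlenr] at h1; exact_mod_cast h1
    exact (memS_iff _ L (by rw [length_lastStr]; omega) hL).mp h2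
  · intro h
    have hlen : (lastStr rem L).toList.length = L := length_of_mem_groupOf _ L hL h
    have hle : L ≤ rem.toList.length := by
      have := length_lastStr rem L; omega
    refine ⟨by rw [hlenr]; exact_mod_cast hle, ?_⟩
    exact (memS_iff _ L hlen hL).mpr h

lemma sorted_prefixes :
    PySem.List.sorted pvPREFIXES (fun s => PySem.Str.len s) true
      = ["ch", "qo", "sh", "da", "ok", "ot", "ct", "ol"] := by decide

lemma sorted_suffixes :
    PySem.List.sorted pvSUFFIXES (fun s => PySem.Str.len s) true
      = groupOf 4 ++ groupOf 3 ++ groupOf 2 ++ groupOf 1 := by decide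

-- A's whole suffix scan, as four if-tests on lastStr
lemma find?_suffixes (rem : String) :
    (PySem.List.sorted pvSUFFIXES (fun s => PySem.Str.len s) true).find?
        (fun s => PySem.Str.endswith rem s)
      = if lastStr rem 4 ∈ groupOf 4 then some (lastStr rem 4)
        else if lastStr rem 3 ∈ groupOf 3 then some (lastStr rem 3)
        else if lastStr rem 2 ∈ groupOf 2 then some (lastStr rem 2)
        else if lastStr rem 1 ∈ groupOf 1 then some (lastStr rem 1)
        else none := by
  rw [sorted_suffixes]
  rw [List.find?_append, List.find?_append, List.find?_append]
  rw [find?_endswith_group 4 rem _ (fun s hs => length_of_mem_groupOf s 4 (by omega) hs),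
      find?_endswith_group 3 rem _ (fun s hs => length_of_mem_groupOf s 3 (by omega) hs),
      find?_endswith_group 2 rem _ (fun s hs => length_of_mem_groupOf s 2 (by omega) hs),
      find?_endswith_group 1 rem _ (fun s hs => length_of_mem_groupOf s 1 (by omega) hs)]
  by_cases h4 : lastStr rem 4 ∈ groupOf 4 <;>
    by_cases h3 : lastStr rem 3 ∈ groupOf 3 <;>
    by_cases h2 : lastStr rem 2 ∈ groupOf 2 <;>
    simp [h4, h3, h2, Option.or]

-- B's loop, rewritten through altCond_iff into the same four if-tests
lemma altSuffixLoop_eq (rem : String) :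
    altSuffixLoop rem [4, 3, 2, 1]
      = if lastStr rem 4 ∈ groupOf 4 then
          some (PySem.Str.slice rem none (some (-(4 : Int))), PySem.Str.slice rem (some (-(4 : Int))) none)
        else if lastStr rem 3 ∈ groupOf 3 then
          some (PySem.Str.slice rem none (some (-(3 : Int))), PySem.Str.slice rem (some (-(3 : Int))) none)
        else if lastStr rem 2 ∈ groupOf 2 then
          some (PySem.Str.slice rem none (some (-(2 : Int))), PySem.Str.slice rem (some (-(2 : Int))) none)
        else if lastStr rem 1 ∈ groupOf 1 then
          some (PySem.Str.slice rem none (some (-(1 : Int))), PySem.Str.slice rem (some (-(1 : Int))) none)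
        else none := by
  have c4 := altCond_iff rem 4 (by omega)
  have c3 := altCond_iff rem 3 (by omega)
  have c2 := altCond_iff rem 2 (by omega)
  have c1 := altCond_iff rem 1 (by omega)
  simp only [Nat.cast_ofNat, Nat.cast_one] at c4 c3 c2 c1
  rw [altSuffixLoop, altSuffixLoop, altSuffixLoop, altSuffixLoop, altSuffixLoop]
  rw [if_congr c4 rfl (if_congr c3 rfl (if_congr c2 rfl (if_congr c1 rfl rfl)))]

-- ===== VERDICT (by name: the statement is the Claim_ definition above) =====
theorem decompose_token_spec : Claim_equal_decompose_token := by
  intro token _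
  unfold Spec_decompose_token decompose_token decompose_token_alt get_prefix
  have hslice2 : PySem.Str.slice token none (some 2) = firstStr token 2 := by
    apply String.toList_inj.mp
    simp [firstStr, pysem]
  have hcontains : (PySem.Set.contains pvPREFIX_SET (PySem.Str.slice token none (some 2)) = true)
      ↔ firstStr token 2 ∈ (["ch","qo","sh","da","ok","ot","ct","ol"] : List String) := by
    rw [hslice2, PySem.Set.contains_iff, show pvPREFIX_SET = PySem.Set.ofList _ from rfl,
        PySem.Set.mem_ofList]
  rw [sorted_prefixes, find?_startswith_group 2 token _ (by decide)]
  by_cases hp : firstStr token 2 ∈ (["ch","qo","sh","da","ok","ot","ct","ol"] : List String)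
  · rw [if_pos hp]
    rw [if_pos (hcontains.mpr hp)]
    have hpfxlen : PySem.Str.len (firstStr token 2) = 2 := by
      simp only [List.mem_cons, List.not_mem_nil, or_false] at hp
      rcases hp with h|h|h|h|h|h|h|h <;> rw [h] <;> rfl
    simp only [hpfxlen]
    set rem := PySem.Str.slice token (some (2 : Int)) none with hrem
    rw [find?_suffixes, altSuffixLoop_eq]
    have hlen14 : ∀ L, (L = 4 ∨ L = 3 ∨ L = 2 ∨ L = 1) → lastStr rem L ∈ groupOf L →
        PySem.Str.len (lastStr rem L) = L := by
      intro L hL hmem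
      have := length_of_mem_groupOf _ L hL hmem
      simp [pysem, this]
    have hsfx : ∀ L : Nat, 0 < L → PySem.Str.slice rem (some (-(L : Int))) none = lastStr rem L :=
      fun L hL => suffix_slice_eq rem L hL
    by_cases h4 : lastStr rem 4 ∈ groupOf 4
    · rw [if_pos h4, if_pos h4]
      dsimp only
      rw [hlen14 4 (by omega) h4, ← hslice2,
         show PySem.Str.slice rem (some (-(4 : Int))) none = lastStr rem 4 from hsfx 4 (by omega),
         show ((4 : Nat) : Int) = (4 : Int) from rfl]
    rw [if_neg h4, if_neg h4]
    by_cases h3 : lastStr rem 3 ∈ groupOf 3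
    · rw [if_pos h3, if_pos h3]
      dsimp only
      rw [hlen14 3 (by omega) h3, ← hslice2,
         show PySem.Str.slice rem (some (-(3 : Int))) none = lastStr rem 3 from hsfx 3 (by omega),
         show ((3 : Nat) : Int) = (3 : Int) from rfl]
    rw [if_neg h3, if_neg h3]
    by_cases h2 : lastStr rem 2 ∈ groupOf 2
    · rw [if_pos h2, if_pos h2]
      dsimp only
      rw [hlen14 2 (by omega) h2, ← hslice2,
         show PySem.Str.slice rem (some (-(2 : Int))) none = lastStr rem 2 from hsfx 2 (by omega),
         show ((2 : Nat) : Int) = (2 : Int) from rfl]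
    rw [if_neg h2, if_neg h2]
    by_cases h1 : lastStr rem 1 ∈ groupOf 1
    · rw [if_pos h1, if_pos h1]
      dsimp only
      rw [hlen14 1 (by omega) h1, ← hslice2,
         show PySem.Str.slice rem (some (-(1 : Int))) none = lastStr rem 1 from hsfx 1 (by omega),
         show ((1 : Nat) : Int) = (1 : Int) from rfl]
    rw [if_neg h1, if_neg h1]
    dsimp only
    have hlenrem : PySem.Str.len rem = rem.toList.length := by simp [pysem]
    by_cases hz : PySem.Str.len rem = 0
    · rw [if_neg (by omega), if_neg (by omega), ← hslice2]
      have : rem = "" := by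
        apply String.toList_inj.mp
        have : rem.toList.length = 0 := by omega
        simpa using List.eq_nil_of_length_eq_zero this
      rw [this]
    by_cases h2le : 2 ≤ PySem.Str.len rem
    · rw [if_pos (by omega), if_pos (by omega), if_pos (by omega), if_pos h2le, ← hslice2]
    · have hone : rem.toList.length = 1 := by omega
      rw [if_pos (by omega), if_neg (by omega), if_pos (by omega), if_neg h2le, ← hslice2]
      have hm : PySem.Str.slice rem none (some (-(1 : Int))) = "" := by
        rw [show (-(1 : Int)) = -((1 : Nat) : Int) from rfl, middle_slice_eq rem 1 (by omega)]
        apply String.toList_inj.mp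
        simp [hone]
      have hs1 : PySem.Str.slice rem (some (-(1 : Int))) none = rem := by
        rw [show PySem.Str.slice rem (some (-(1 : Int))) none = lastStr rem 1 from hsfx 1 (by omega)]
        apply String.toList_inj.mp
        simp [lastStr, hone]
      rw [hm, hs1]
  · rw [if_neg hp, if_neg (fun h => hp (hcontains.mp h))]
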